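-- pv_equiv track=rewrite | github.com/2025-II-Infra-ADAII/proyecto-i-ada-ii-aguafuegotierraaire-team | src/roFB.py | roFB
-- ===== SOURCE A (Python) =====
-- from itertools import permutations
--
-- def calcular_tiempos_inicio(finca, permutacion):
--     tiempos = {}
--     tiempo_actual = 0
--
--     for tablon in permutacion:
--         tiempos[tablon] = tiempo_actual
--         tr = finca[tablon][1]
--         tiempo_actual += tr
--
--     return tiempos
--
-- def calculoCostoPerm(finca, permutacion):
--     tiempos_inicio = calcular_tiempos_inicio(finca, permutacion)
--     costo_total = 0
--     for tablon in range(len(finca)):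
--         ts, tr, p = finca[tablon]
--         t_inicio = tiempos_inicio[tablon]
--         t_fin_riego = t_inicio + tr
--         penalizacion = p * max(0, t_fin_riego - ts)
--         costo_total += penalizacion
--     return costo_total
--
-- def roFB(finca):
--     n = len(finca)
--     if n == 0:
--         return ([], 0)
--
--     indices = list(range(n))
--     mejor_costo = float('inf')
--     mejor_permutacion = None
--
--     for permutacion in permutations(indices):
--         costo = calculoCostoPerm(finca, permutacion)
--         if costo < mejor_costo:
--             mejor_costo = costo
--             mejor_permutacion = permutacion
--
--     return (list(mejor_permutacion), mejor_costo)
-- ===== SOURCE B (Python) =====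
-- def roFB(finca):
--     # Held-Karp: memoized recursion over the set of still-unscheduled plots.
--     # best(rem, t) = (lex-first optimal order of rem started at time t, its cost);
--     # t is determined by rem, so memoizing on rem alone is sound.
--     n = len(finca)
--     memo = {}
--
--     def best(rem, t):
--         if not rem:
--             return ([], 0)
--         if rem in memo:
--             return memo[rem]
--         res = None
--         for idx in range(len(rem)):
--             i = rem[idx]
--             ts, tr, p = finca[i]
--             c = p * max(0, t + tr - ts)
--             sub_perm, sub_cost = best(rem[:idx] + rem[idx + 1:], t + tr)
--             if res is None or c + sub_cost < res[1]:
--                 res = ([i] + sub_perm, c + sub_cost)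
--         memo[rem] = res
--         return res
--
--     return best(tuple(range(n)), 0)
-- ===== Notes on version B (the rewrite author's own statement) =====
-- stated objective: faster
-- what changed: A enumerates all n! permutations with itertools and re-computes each schedule's cost from scratch; B is a Held-Karp dynamic program: a memoized recursion over the set of still-unscheduled plots (start time is determined by the set), picking the smallest-index first plot among cost minimizers, which reproduces A's lex-first tie-breaking exactly.
import Mathlib
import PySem

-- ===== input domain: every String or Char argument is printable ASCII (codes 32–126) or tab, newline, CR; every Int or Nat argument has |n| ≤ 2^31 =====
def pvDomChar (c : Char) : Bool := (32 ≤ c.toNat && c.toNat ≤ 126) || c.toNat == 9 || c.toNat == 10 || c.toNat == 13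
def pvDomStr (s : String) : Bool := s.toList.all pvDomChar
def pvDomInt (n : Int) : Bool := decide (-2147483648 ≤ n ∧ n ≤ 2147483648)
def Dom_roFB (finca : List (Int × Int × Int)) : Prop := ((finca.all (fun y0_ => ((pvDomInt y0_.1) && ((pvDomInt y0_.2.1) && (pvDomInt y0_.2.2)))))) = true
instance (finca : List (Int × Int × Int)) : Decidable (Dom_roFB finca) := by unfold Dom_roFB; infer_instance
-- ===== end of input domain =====

-- B replaces A's enumeration of all n! permutations by a Held-Karp recursion over the
-- set of unscheduled plots (memoized in Python; the memo is a pure cache, dropped in the port).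

-- ===== PORT A =====
-- calcular_tiempos_inicio: dict of start times; the pair carries (tiempos, tiempo_actual)
def calcularTiemposInicio (finca : List (Int × Int × Int)) (permutacion : List Int) :
    PySem.Dict Int Int :=
  (permutacion.foldl
    (fun (st : PySem.Dict Int Int × Int) tablon =>
      -- finca[tablon]: always in range at every call site (tablon ∈ range(len(finca)))
      let tr := (PySem.List.pyGetD finca tablon (0, 0, 0)).2.1
      (st.1.insert tablon st.2, st.2 + tr))
    (PySem.Dict.empty, 0)).1

def calculoCostoPerm (finca : List (Int × Int × Int)) (permutacion : List Int) : Int :=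
  let tiempos := calcularTiemposInicio finca permutacion
  (PySem.List.pyRange 0 (finca.length : Int) 1).foldl
    (fun costo tablon =>
      let f := PySem.List.pyGetD finca tablon (0, 0, 0)  -- in range: tablon ∈ range(len(finca))
      -- tiempos_inicio[tablon]: key always present (permutacion covers all of range(n))
      let tInicio := (tiempos.get? tablon).getD 0
      costo + f.2.2 * max 0 (tInicio + f.2.1 - f.1))
    0

def roFB (finca : List (Int × Int × Int)) : List Int × Int :=
  let n := finca.length
  if n = 0 then ([], 0)
  else
    let indices : List Int := PySem.List.pyRange 0 (n : Int) 1
    -- (mejor_costo = inf, mejor_permutacion = None) ported as one Option accumulator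
    let mejor := (PySem.List.permutations indices indices.length).foldl
      (fun (mejor : Option (List Int × Int)) permutacion =>
        let costo := calculoCostoPerm finca permutacion
        match mejor with
        | none => some (permutacion, costo)
        | some m => if costo < m.2 then some (permutacion, costo) else some m)
      none
    match mejor with
    | some m => (m.1, m.2)
    | none => ([], 0)  -- unreachable: permutations of a nonempty list is nonempty

-- ===== PORT B =====
-- best(rem, t) of Source B; the memo cache is a pure-function cache and is omitted
def bestB (finca : List (Int × Int × Int)) : List Int → Int → List Int × Int
  | [], _ => ([], 0)
  | hd :: tl, t =>
    let rem := hd :: tl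
    let res := (List.range rem.length).attach.foldl
      (fun (res : Option (List Int × Int)) idx =>
        let i := PySem.List.pyGetD rem (idx.1 : Int) 0  -- rem[idx], idx ∈ range(len(rem))
        let f := PySem.List.pyGetD finca i (0, 0, 0)    -- finca[i]
        let c := f.2.2 * max 0 (t + f.2.1 - f.1)
        let sub := bestB finca (rem.eraseIdx idx.1) (t + f.2.1)
        match res with
        | none => some (i :: sub.1, c + sub.2)
        | some r => if c + sub.2 < r.2 then some (i :: sub.1, c + sub.2) else some r)
      none
    res.getD ([], 0)  -- res is some: rem is nonempty, so the loop ran at least once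
termination_by rem _ => rem.length
decreasing_by
  have h := idx.2
  simp only [List.mem_range] at h
  show ((hd :: tl).eraseIdx idx.1).length < (hd :: tl).length
  rw [List.length_eraseIdx, if_pos h]
  simp only [List.length_cons]
  omega

def roFB_alt (finca : List (Int × Int × Int)) : List Int × Int :=
  bestB finca (PySem.List.pyRange 0 (finca.length : Int) 1) 0

-- ===== PRECONDITION & SPEC =====
def Spec_roFB (finca : List (Int × Int × Int)) (out : List Int × Int) : Prop := out = roFB_alt finca
instance (finca : List (Int × Int × Int)) (out : List Int × Int) : Decidable (Spec_roFB finca out) := by unfold Spec_roFB; infer_instance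

-- ===== CLAIM (what is proved, stated in full; the proofs are below) =====
def Claim_equal_roFB : Prop := ∀ (finca : List (Int × Int × Int)), Dom_roFB finca → Spec_roFB finca (roFB finca)

-- ===== LEMMAS AND PROOFS =====

-- the shared "keep the first strict minimum by cost" step of both folds
def pvStep (res : Option (List Int × Int)) (c : List Int × Int) : Option (List Int × Int) :=
  match res with
  | none => some c
  | some r => if c.2 < r.2 then some c else some r

-- combining: folding a list after an accumulator = merging the two first-minima
def pvComb (a b : Option (List Int × Int)) : Option (List Int × Int) :=
  match a, b with
  | a, none => a
  | none, some c => some c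
  | some r, some c => if c.2 < r.2 then some c else some r

-- cost of a schedule, accumulated left to right
def seqCost (finca : List (Int × Int × Int)) (t : Int) : List Int → Int
  | [] => 0
  | i :: rest =>
    let f := PySem.List.pyGetD finca i (0, 0, 0)
    f.2.2 * max 0 (t + f.2.1 - f.1) + seqCost finca (t + f.2.1) rest

-- start time of plot j in schedule l started at time t (j ∈ l, l nodup)
def startT (finca : List (Int × Int × Int)) (t : Int) (j : Int) : List Int → Int
  | [] => 0
  | i :: rest =>
    if j = i then t
    else startT finca (t + (PySem.List.pyGetD finca i (0, 0, 0)).2.1) j rest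

lemma pvComb_step (a : Option (List Int × Int)) (x : List Int × Int) (F : Option (List Int × Int)) :
    pvComb (pvStep a x) F = pvComb a (pvComb (some x) F) := by
  rcases a with _ | r <;> rcases F with _ | b
  · rfl
  · simp only [pvStep, pvComb]; split_ifs <;> rfl
  · rfl
  · by_cases h1 : x.2 < r.2 <;> by_cases h2 : b.2 < x.2 <;> by_cases h3 : b.2 < r.2 <;>
      simp [pvStep, pvComb, h1, h2, h3] <;> omega

lemma foldl_pvStep_eq_comb (l : List (List Int × Int)) (a : Option (List Int × Int)) :
    l.foldl pvStep a = pvComb a (l.foldl pvStep none) := by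
  induction l generalizing a with
  | nil => cases a <;> rfl
  | cons x l ih =>
    simp only [List.foldl_cons]
    rw [ih (pvStep a x), ih (pvStep none x), pvComb_step]
    rfl

-- an affine cost shift commutes with the first-minimum fold
lemma foldl_pvStep_map_affine (l : List (List Int × Int)) (g : List Int → List Int) (k : Int)
    (a : Option (List Int × Int)) :
    (l.map (fun p => (g p.1, k + p.2))).foldl pvStep (a.map (fun p => (g p.1, k + p.2))) =
      (l.foldl pvStep a).map (fun p => (g p.1, k + p.2)) := by
  induction l generalizing a with
  | nil => rfl
  | cons x l ih =>
    simp only [List.map_cons, List.foldl_cons]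
    rw [← ih (pvStep a x)]
    congr 1
    rcases a with _ | r
    · rfl
    · simp only [pvStep, Option.map_some]
      split_ifs with h1 h2 h2 <;> first | rfl | omega

-- if every segment folds to its candidate, folding the concatenation = folding the candidates
lemma foldl_pvStep_flatMap {α : Type} (S : List α) (seg : α → List (List Int × Int))
    (cand : α → List Int × Int)
    (h : ∀ s ∈ S, (seg s).foldl pvStep none = some (cand s)) :
    (S.flatMap seg).foldl pvStep none = (S.map cand).foldl pvStep none := by
  induction S with
  | nil => rfl
  | cons s S ih =>
    simp only [List.flatMap_cons, List.map_cons, List.foldl_cons, List.foldl_append]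
    rw [h s (by simp)]
    show List.foldl pvStep (some (cand s)) _ = List.foldl pvStep (some (cand s)) _
    rw [foldl_pvStep_eq_comb (S.flatMap seg) (some (cand s)),
        foldl_pvStep_eq_comb (S.map cand) (some (cand s)),
        ih (fun x hx => h x (by simp [hx]))]

-- the defining equation of permutations at a successor length
lemma permutations_succ {α : Type} (xs : List α) (k : Nat) :
    PySem.List.permutations xs (k + 1) =
      (List.range xs.length).flatMap
        (fun i => match xs[i]? with
          | none => []
          | some x => (PySem.List.permutations (xs.eraseIdx i) k).map (fun p => x :: p)) := by
  rw [PySem.List.permutations]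
  rfl

-- B's candidate for choosing position i of rem first
def pvCand (finca : List (Int × Int × Int)) (rem : List Int) (t : Int) (i : Nat) :
    List Int × Int :=
  let y := PySem.List.pyGetD rem (i : Int) 0
  let f := PySem.List.pyGetD finca y (0, 0, 0)
  let sub := bestB finca (rem.eraseIdx i) (t + f.2.1)
  (y :: sub.1, f.2.2 * max 0 (t + f.2.1 - f.1) + sub.2)

-- bestB's loop, rewritten as the pvStep fold over its candidates
lemma bestB_cons (finca : List (Int × Int × Int)) (hd : Int) (tl : List Int) (t : Int) :
    bestB finca (hd :: tl) t =
      (((List.range (hd :: tl).length).foldl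
          (fun res i => pvStep res (pvCand finca (hd :: tl) t i)) none)).getD ([], 0) := by
  rw [bestB]
  rw [← List.foldl_attach (l := List.range (hd :: tl).length)
      (f := fun res i => pvStep res (pvCand finca (hd :: tl) t i)) (b := none)]
  rfl

-- a pvStep fold started from some never returns none
lemma foldl_pvStep_isSome (l : List (List Int × Int)) (r : List Int × Int) :
    (l.foldl pvStep (some r)).isSome := by
  induction l generalizing r with
  | nil => rfl
  | cons x l ih =>
    simp only [List.foldl_cons, pvStep]
    split_ifs <;> exact ih _

-- ===== MAIN INDUCTION: the first-minimum over all permutations is bestB =====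
lemma main_fold (finca : List (Int × Int × Int)) (n : Nat) (rem : List Int) (t : Int)
    (hn : rem.length = n) :
    ((PySem.List.permutations rem rem.length).map
        (fun p => (p, seqCost finca t p))).foldl pvStep none =
      some (bestB finca rem t) := by
  induction n using Nat.strong_induction_on generalizing rem t with
  | _ n ih =>
  match rem with
  | [] =>
    rw [bestB]
    simp [PySem.List.permutations_zero, pvStep, seqCost]
  | hd :: tl =>
    have hlen : (hd :: tl).length = tl.length + 1 := rfl
    rw [hlen, permutations_succ, List.map_flatMap, bestB_cons,
        foldl_pvStep_flatMap (List.range (hd :: tl).length) _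
          (pvCand finca (hd :: tl) t) ?hseg]
    · rw [List.foldl_map]
      rw [hlen, List.range_succ_eq_map, List.foldl_cons]
      have := foldl_pvStep_isSome
        (((List.range tl.length).map Nat.succ).map (pvCand finca (hd :: tl) t))
        (pvCand finca (hd :: tl) t 0)
      rw [List.foldl_map] at this
      show _ = some ((List.foldl (fun res i => pvStep res (pvCand finca (hd :: tl) t i))
        (some (pvCand finca (hd :: tl) t 0)) ((List.range tl.length).map Nat.succ)).getD ([], 0))
      rcases ho : List.foldl (fun res i => pvStep res (pvCand finca (hd :: tl) t i))
          (some (pvCand finca (hd :: tl) t 0)) ((List.range tl.length).map Nat.succ) with _ | v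
      · rw [ho] at this; cases this
      · exact ho
    case hseg =>
      intro i hi
      have hi' : i < (hd :: tl).length := List.mem_range.mp hi
      have hget : (hd :: tl)[i]? = some ((hd :: tl)[i]'hi') := List.getElem?_eq_getElem hi'
      rw [hget]
      have hylen : ((hd :: tl).eraseIdx i).length = tl.length := by
        rw [List.length_eraseIdx, if_pos hi']; rfl
      set y := (hd :: tl)[i]'hi' with hy
      set f := PySem.List.pyGetD finca y (0, 0, 0) with hf
      have hseq : ∀ p, seqCost finca t (y :: p) =
          f.2.2 * max 0 (t + f.2.1 - f.1) + seqCost finca (t + f.2.1) p := fun p => rfl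
      rw [List.map_map]
      have hmaps : ((fun p => (p, seqCost finca t p)) ∘ fun p => y :: p) =
          (fun q : List Int × Int => (y :: q.1, f.2.2 * max 0 (t + f.2.1 - f.1) + q.2)) ∘
            (fun p => (p, seqCost finca (t + f.2.1) p)) := by
        funext p; simp [hseq p]
      rw [hmaps, ← List.map_map]
      have hinner := ih tl.length (by omega) ((hd :: tl).eraseIdx i) (t + f.2.1) hylen
      rw [hylen] at hinner
      have haff := foldl_pvStep_map_affine
        ((PySem.List.permutations ((hd :: tl).eraseIdx i) tl.length).map
          (fun p => (p, seqCost finca (t + f.2.1) p)))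
        (fun l => y :: l) (f.2.2 * max 0 (t + f.2.1 - f.1)) none
      simp only [Option.map_none] at haff
      rw [haff, hinner]
      simp only [Option.map_some]
      have hyg : PySem.List.pyGetD (hd :: tl) (i : Int) 0 = y := by
        rw [PySem.List.pyGetD_natCast, List.getD_eq_getElem?_getD, List.getElem?_eq_getElem hi']
        rfl
      simp only [pvCand, ← hyg, hf]

-- ===== COST LEMMAS: the dict-based cost of A equals seqCost on a nodup covering schedule =====
lemma dict_untouched (finca : List (Int × Int × Int)) (l : List Int) (j : Int) (hj : j ∉ l)
    (d : PySem.Dict Int Int) (t : Int) :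
    ((l.foldl (fun (st : PySem.Dict Int Int × Int) tablon =>
        let tr := (PySem.List.pyGetD finca tablon (0, 0, 0)).2.1
        (st.1.insert tablon st.2, st.2 + tr)) (d, t)).1).get? j = d.get? j := by
  induction l generalizing d t with
  | nil => rfl
  | cons i rest ih =>
    simp only [List.foldl_cons]
    rw [ih (fun h => hj (by simp [h]))]
    exact PySem.Dict.get?_insert_of_ne _ _ (fun h => hj (by simp [h]))

lemma dict_get (finca : List (Int × Int × Int)) (l : List Int) (hnd : l.Nodup) (j : Int)
    (hj : j ∈ l) (d : PySem.Dict Int Int) (t : Int) :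
    ((l.foldl (fun (st : PySem.Dict Int Int × Int) tablon =>
        let tr := (PySem.List.pyGetD finca tablon (0, 0, 0)).2.1
        (st.1.insert tablon st.2, st.2 + tr)) (d, t)).1).get? j = some (startT finca t j l) := by
  induction l generalizing d t with
  | nil => cases hj
  | cons i rest ih =>
    simp only [List.foldl_cons, startT]
    rcases List.mem_cons.mp hj with rfl | hjr
    · rw [if_pos rfl, dict_untouched finca rest j (by simpa using (List.nodup_cons.mp hnd).1)]
      exact PySem.Dict.get?_insert_self _ _ _
    · rw [if_neg (by rintro rfl; exact (List.nodup_cons.mp hnd).1 hjr)]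
      exact ih (List.nodup_cons.mp hnd).2 hjr _ _

lemma sum_startT (finca : List (Int × Int × Int)) (p : List Int) (hnd : p.Nodup) (t : Int) :
    (p.map (fun j =>
        let f := PySem.List.pyGetD finca j (0, 0, 0)
        f.2.2 * max 0 (startT finca t j p + f.2.1 - f.1))).sum = seqCost finca t p := by
  induction p generalizing t with
  | nil => rfl
  | cons i rest ih =>
    simp only [List.map_cons, List.sum_cons, seqCost, startT]
    congr 1
    rw [← ih (List.nodup_cons.mp hnd).2]
    refine congrArg _ (List.map_congr_left fun j hj => ?_)
    rw [if_neg (by rintro rfl; exact (List.nodup_cons.mp hnd).1 hj)]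

lemma costA_eq_seqCost (finca : List (Int × Int × Int)) (p : List Int)
    (hp : p.Perm (PySem.List.pyRange 0 (finca.length : Int) 1)) :
    calculoCostoPerm finca p = seqCost finca 0 p := by
  have hnd : p.Nodup := hp.nodup_iff.mpr (by
    rw [PySem.List.pyRange_zero_natCast]
    exact (List.nodup_range).map (fun a b h => by exact_mod_cast h))
  have hmem : ∀ j, j ∈ PySem.List.pyRange 0 (finca.length : Int) 1 ↔ j ∈ p :=
    fun j => (hp.mem_iff).symm
  unfold calculoCostoPerm calcularTiemposInicio
  rw [PySem.List.foldl_add]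
  have hterm : ∀ j ∈ PySem.List.pyRange 0 (finca.length : Int) 1,
      (fun tablon =>
        let f := PySem.List.pyGetD finca tablon (0, 0, 0)
        (((p.foldl (fun (st : PySem.Dict Int Int × Int) tablon =>
            let tr := (PySem.List.pyGetD finca tablon (0, 0, 0)).2.1
            (st.1.insert tablon st.2, st.2 + tr)) (PySem.Dict.empty, 0)).1.get? tablon).getD 0 : Int) |>
          (fun tI => f.2.2 * max 0 (tI + f.2.1 - f.1))) j =
      (fun j =>
        let f := PySem.List.pyGetD finca j (0, 0, 0)
        f.2.2 * max 0 (startT finca 0 j p + f.2.1 - f.1)) j := by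
    intro j hj
    have := dict_get finca p hnd j ((hmem j).mp hj) PySem.Dict.empty 0
    simp only [this]
    rfl
  rw [List.map_congr_left hterm, (hp.map _).symm.sum_eq, sum_startT finca p hnd 0]
  ring

-- ===== VERDICT (by name: the statement is the Claim_ definition above) =====
theorem roFB_spec : Claim_equal_roFB := by
  unfold Claim_equal_roFB
  intro finca _
  unfold Spec_roFB roFB roFB_alt
  by_cases h0 : finca.length = 0
  · rw [if_pos h0, h0]
    show ([], (0 : Int)) = bestB finca (PySem.List.pyRange 0 ((0 : Nat) : Int) 1) 0
    rw [show PySem.List.pyRange 0 ((0 : Nat) : Int) 1 = [] from rfl, bestB]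
  · rw [if_neg h0]
    set indices := PySem.List.pyRange 0 (finca.length : Int) 1 with hind
    show (match (PySem.List.permutations indices indices.length).foldl
        (fun acc p => pvStep acc (p, calculoCostoPerm finca p)) none with
      | some m => (m.1, m.2)
      | none => ([], 0)) = bestB finca indices 0
    have hfold : (PySem.List.permutations indices indices.length).foldl
        (fun acc p => pvStep acc (p, calculoCostoPerm finca p)) none =
        ((PySem.List.permutations indices indices.length).map
          (fun p => (p, calculoCostoPerm finca p))).foldl pvStep none :=
      (List.foldl_map (f := fun p => (p, calculoCostoPerm finca p)) (g := pvStep)).symm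
    have hmap : ((PySem.List.permutations indices indices.length).map
        (fun p => (p, calculoCostoPerm finca p))) =
        ((PySem.List.permutations indices indices.length).map
          (fun p => (p, seqCost finca 0 p))) :=
      List.map_congr_left (fun p hp => by
        rw [costA_eq_seqCost finca p (PySem.List.perm_of_mem_permutations hp)])
    rw [hfold, hmap, main_fold finca indices.length indices 0 rfl]
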